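-- pv_equiv track=rewrite | github.com/zcxbin/code_ptit_python | ThucHanhBuoi2/DaySoTuongThich.py | check_all_divisors
-- ===== SOURCE A (Python) =====
-- def find_divisor(x, target):
--     found = False
--     left, right = 1, x
--     while left < right:
--         mid = (left + right) // 2
--         if x // mid > target:
--             left = mid + 1
--         elif x // mid < target:
--             right = mid - 1
--         else:
--             found = True
--             right = mid
--     if x // right == target:
--         found = True
--     return found, right
--
-- def check_all_divisors(arr, target):
--     total = 0
--     for num in arr:
--         result = find_divisor(num, target)
--         if not result[0]:
--             return False, total
--         total += result[1]
--     return True, total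
-- ===== SOURCE B (Python) =====
-- def check_all_divisors(arr, target):
--     # Leftmost m with x // m == target, in closed form: m = x // (target + 1) + 1.
--     # A positive quotient target needs a positive x; anything else has no witness.
--     total = 0
--     for x in arr:
--         if x <= 0 or target <= 0:
--             return False, total
--         m = x // (target + 1) + 1
--         if x // m != target:
--             return False, total
--         total += m
--     return True, total
-- ===== Notes on version B (the rewrite author's own statement) =====
-- stated objective: alternative
-- what changed: Replaces A's per-element binary search for the leftmost mid with x//mid==target by the closed form m = x//(target+1)+1 (valid iff x//m==target); Pre_ excludes exactly the inputs on which A raises ZeroDivisionError (the scan reaches a 0 element, or a positive element < target whose halving orbit drives right to 0).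
-- intended difference: When target == 1 and the array contains a negative element, A's binary search never runs (left=1 > right=x) so A accidentally accepts the negative element and returns (True, total including the negatives themselves), while B returns (False, total so far), the intended value since no positive mid gives quotient 1 for a negative number. — e.g. on check_all_divisors([-2], 1): A returns (true, -2), B returns (false, 0)
import Mathlib
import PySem

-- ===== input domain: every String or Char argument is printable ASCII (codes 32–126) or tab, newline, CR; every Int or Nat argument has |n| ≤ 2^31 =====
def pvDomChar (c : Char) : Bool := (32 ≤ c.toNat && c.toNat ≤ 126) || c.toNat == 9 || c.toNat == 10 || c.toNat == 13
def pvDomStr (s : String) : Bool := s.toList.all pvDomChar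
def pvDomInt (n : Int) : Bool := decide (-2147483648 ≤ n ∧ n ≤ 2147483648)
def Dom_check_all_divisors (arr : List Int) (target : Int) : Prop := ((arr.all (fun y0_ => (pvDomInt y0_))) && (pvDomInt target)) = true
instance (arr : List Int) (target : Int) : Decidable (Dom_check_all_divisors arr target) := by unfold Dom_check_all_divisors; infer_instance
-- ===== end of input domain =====

-- B replaces A's per-element binary search by the closed form m = x // (target+1) + 1;
-- equivalence is about the return value, outside the stated intended difference D_.

-- ===== PORT A =====
-- the while-loop of find_divisor; state (left, right, found), measure right - left
def fdLoop (x target left right : Int) (found : Bool) : Bool × Int :=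
  if _h : left < right then
    let mid := PySem.Int.floordiv (left + right) 2
    if PySem.Int.floordiv x mid > target then
      fdLoop x target (mid + 1) right found
    else if PySem.Int.floordiv x mid < target then
      fdLoop x target left (mid - 1) found
    else
      fdLoop x target left mid true
  else (found, right)
termination_by (right - left).toNat
decreasing_by
  all_goals
    have hb := PySem.Int.floordiv_two_mid_bounds (le_of_lt _h)
    have hlt : PySem.Int.floordiv (left + right) 2 < right :=
      (PySem.Int.floordiv_lt_iff_lt_mul (by omega)).mpr (by omega)
    omega

def find_divisor (x target : Int) : Bool × Int :=
  let p := fdLoop x target 1 x false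
  if PySem.Int.floordiv x p.2 = target then (true, p.2) else p

def goA : List Int → Int → Int → Bool × Int
  | [], _, total => (true, total)
  | num :: rest, target, total =>
    let result := find_divisor num target
    if !result.1 then (false, total)
    else goA rest target (total + result.2)

def check_all_divisors (arr : List Int) (target : Int) : Bool × Int :=
  goA arr target 0

-- ===== PORT B =====
def goB : List Int → Int → Int → Bool × Int
  | [], _, total => (true, total)
  | x :: rest, target, total =>
    if x ≤ 0 ∨ target ≤ 0 then (false, total)
    else
      let m := PySem.Int.floordiv x (target + 1) + 1
      if PySem.Int.floordiv x m ≠ target then (false, total)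
      else goB rest target (total + m)

def check_all_divisors_alt (arr : List Int) (target : Int) : Bool × Int :=
  goB arr target 0

-- ===== PRECONDITION & SPEC =====
-- Pre_ excludes exactly the inputs on which Python A raises ZeroDivisionError (x // right
-- with right = 0): the left-to-right scan reaches (all earlier elements are accepted, i.e.
-- pvPass) an element that is 0, or positive, < target and with x ∈ [3·2^k − 1, 4·2^k − 2]
-- for some k (its halving orbit drives right to 0).
def pvBadElem (x target : Int) : Bool :=
  decide (x = 0 ∨
    (2 ≤ x ∧ x < target ∧ ∃ k ∈ Finset.range 32, 3 * 2 ^ k - 1 ≤ x ∧ x ≤ 4 * 2 ^ k - 2))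

-- the elements the scan moves past: negative with target 1, or positive with a valid witness
def pvPass (x target : Int) : Bool :=
  decide ((x < 0 ∧ target = 1) ∨
    (0 < x ∧ 1 ≤ target ∧
      PySem.Int.floordiv x (PySem.Int.floordiv x (target + 1) + 1) = target))

def pvSafe (target : Int) : List Int → Bool
  | [] => true
  | x :: rest => !pvBadElem x target && (!pvPass x target || pvSafe target rest)

def Pre_check_all_divisors (arr : List Int) (target : Int) : Prop :=
  pvSafe target arr = true

instance (arr : List Int) (target : Int) : Decidable (Pre_check_all_divisors arr target) := by
  unfold Pre_check_all_divisors; infer_instance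

def pvWitness_check_all_divisors : List Int × Int := ([6, -3, 20], 1)

-- When target == 1 and the array contains a negative element, A's binary search never runs
-- (left=1 > right=x), so A accidentally accepts the negative element and returns
-- (True, total including the negatives themselves); B returns (False, total so far), the
-- intended value since no positive mid gives quotient 1 for a negative number.
def D_check_all_divisors (arr : List Int) (target : Int) : Prop :=
  target = 1 ∧ ∃ x ∈ arr, x < 0

instance (arr : List Int) (target : Int) : Decidable (D_check_all_divisors arr target) := by
  unfold D_check_all_divisors; infer_instance

def Spec_check_all_divisors (arr : List Int) (target : Int) (out : Bool × Int) : Prop :=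
  ¬ D_check_all_divisors arr target → out = check_all_divisors_alt arr target
instance (arr : List Int) (target : Int) (out : Bool × Int) : Decidable (Spec_check_all_divisors arr target out) := by unfold Spec_check_all_divisors; infer_instance

def pvDiffWitness_check_all_divisors : List Int × Int := ([-2], 1)
def pvDiffWitnessOut_check_all_divisors : (Bool × Int) × (Bool × Int) := ((true, -2), (false, 0))

-- ===== CLAIM (what is proved, stated in full; the proofs are below) =====
def Claim_unchanged_check_all_divisors : Prop := ∀ (arr : List Int) (target : Int), Dom_check_all_divisors arr target → Pre_check_all_divisors arr target → Spec_check_all_divisors arr target (check_all_divisors arr target)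
def Claim_changed_check_all_divisors : Prop := Dom_check_all_divisors (pvDiffWitness_check_all_divisors.1) (pvDiffWitness_check_all_divisors.2) ∧ Pre_check_all_divisors (pvDiffWitness_check_all_divisors.1) (pvDiffWitness_check_all_divisors.2) ∧ D_check_all_divisors (pvDiffWitness_check_all_divisors.1) (pvDiffWitness_check_all_divisors.2) ∧ check_all_divisors (pvDiffWitness_check_all_divisors.1) (pvDiffWitness_check_all_divisors.2) = pvDiffWitnessOut_check_all_divisors.1 ∧ check_all_divisors_alt (pvDiffWitness_check_all_divisors.1) (pvDiffWitness_check_all_divisors.2) = pvDiffWitnessOut_check_all_divisors.2 ∧ pvDiffWitnessOut_check_all_divisors.1 ≠ pvDiffWitnessOut_check_all_divisors.2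
def Claim_exact_check_all_divisors : Prop := ∀ (arr : List Int) (target : Int), Dom_check_all_divisors arr target → Pre_check_all_divisors arr target → D_check_all_divisors arr target → check_all_divisors arr target ≠ check_all_divisors_alt arr target

-- ===== LEMMAS AND PROOFS =====

-- Throughout, for 1 ≤ x and 1 ≤ t, write M = x // (t+1) + 1 (the leftmost candidate).

-- x // m > t  ↔  m < M  (for m ≥ 1)
lemma key_gt {x t m : Int} (ht : 1 ≤ t) (hm : 1 ≤ m) :
    t < PySem.Int.floordiv x m ↔ m < PySem.Int.floordiv x (t + 1) + 1 := by
  have h1 : t + 1 ≤ PySem.Int.floordiv x m ↔ (t + 1) * m ≤ x :=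
    PySem.Int.le_floordiv_iff_mul_le (by omega)
  have h2 : m ≤ PySem.Int.floordiv x (t + 1) ↔ m * (t + 1) ≤ x :=
    PySem.Int.le_floordiv_iff_mul_le (by omega)
  rw [mul_comm] at h2
  constructor
  · intro h
    have := h2.mpr (h1.mp (by omega))
    omega
  · intro h
    have := h1.mpr (h2.mp (by omega))
    omega

-- x // m ≤ t  ↔  M ≤ m  (for m ≥ 1)
lemma key_le {x t m : Int} (ht : 1 ≤ t) (hm : 1 ≤ m) :
    PySem.Int.floordiv x m ≤ t ↔ PySem.Int.floordiv x (t + 1) + 1 ≤ m := by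
  have := key_gt (x := x) ht hm
  omega

-- antitone beyond M: M ≤ m → x // m ≤ x // M
lemma key_anti {x t m : Int} (hx : 1 ≤ x) (ht : 1 ≤ t)
    (hm : PySem.Int.floordiv x (t + 1) + 1 ≤ m) :
    PySem.Int.floordiv x m ≤ PySem.Int.floordiv x (PySem.Int.floordiv x (t + 1) + 1) := by
  have hM0 : 0 ≤ PySem.Int.floordiv x (t + 1) :=
    (PySem.Int.le_floordiv_iff_mul_le (by omega)).mpr (by omega)
  set M := PySem.Int.floordiv x (t + 1) + 1 with hMdef
  set q := PySem.Int.floordiv x M with hq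
  have hq0 : 0 ≤ q := (PySem.Int.le_floordiv_iff_mul_le (by omega)).mpr (by omega)
  have hlt : x < (q + 1) * M := (PySem.Int.floordiv_lt_iff_lt_mul (by omega)).mp (by omega)
  have hmono : (q + 1) * M ≤ (q + 1) * m := by nlinarith
  have : PySem.Int.floordiv x m < q + 1 :=
    (PySem.Int.floordiv_lt_iff_lt_mul (by omega)).mpr (by omega)
  omega

-- bounds of M
lemma key_M_bounds {x t : Int} (hx : 1 ≤ x) (ht : 1 ≤ t) :
    1 ≤ PySem.Int.floordiv x (t + 1) + 1 ∧ PySem.Int.floordiv x (t + 1) + 1 ≤ x := by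
  have h0 : 0 ≤ PySem.Int.floordiv x (t + 1) :=
    (PySem.Int.le_floordiv_iff_mul_le (by omega)).mpr (by omega)
  have h1 : PySem.Int.floordiv x (t + 1) < x :=
    (PySem.Int.floordiv_lt_iff_lt_mul (b := t + 1) (by omega)).mpr (by nlinarith)
  constructor <;> omega

-- x // x = 1 for x ≠ 0
lemma fd_self {x : Int} (hx : x ≠ 0) : PySem.Int.floordiv x x = 1 := by
  rcases lt_or_gt_of_ne hx with h | h
  · have hn := PySem.Int.floordiv_neg_neg (-x) (-x)
    simp only [neg_neg] at hn
    rw [hn]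
    exact (PySem.Int.floordiv_eq_iff_of_pos (by omega)).mpr (by constructor <;> nlinarith)
  · exact (PySem.Int.floordiv_eq_iff_of_pos (by omega)).mpr (by constructor <;> nlinarith)

-- x // 0 = 0
lemma fd_zero_right (x : Int) : PySem.Int.floordiv x 0 = 0 := by
  simp [PySem.Int.floordiv]

-- midpoint bounds inside the loop
lemma mid_bounds {l r : Int} (h : l < r) :
    l ≤ PySem.Int.floordiv (l + r) 2 ∧ PySem.Int.floordiv (l + r) 2 < r := by
  have hb := PySem.Int.floordiv_two_mid_bounds (le_of_lt h)
  have := (PySem.Int.floordiv_lt_iff_lt_mul (a := l + r) (b := 2) (q := r) (by omega)).mpr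
    (by omega)
  exact ⟨hb.1, this⟩

-- LOOP, hit case: x // M = t ⇒ the loop ends with right = M
lemma loop_hit {x t : Int} (_hx : 1 ≤ x) (ht : 1 ≤ t)
    (hhit : PySem.Int.floordiv x (PySem.Int.floordiv x (t + 1) + 1) = t) :
    ∀ (n : Nat) (l r : Int) (f : Bool), (r - l).toNat ≤ n → 1 ≤ l →
      l ≤ PySem.Int.floordiv x (t + 1) + 1 → PySem.Int.floordiv x (t + 1) + 1 ≤ r →
      (fdLoop x t l r f).2 = PySem.Int.floordiv x (t + 1) + 1 := by
  intro n
  induction n with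
  | zero =>
    intro l r f hn hl hlM hMr
    rw [fdLoop, dif_neg (by omega : ¬ l < r)]
    simp only
    omega
  | succ n ih =>
    intro l r f hn hl hlM hMr
    by_cases hlr : l < r
    · rw [fdLoop, dif_pos hlr]
      have hmb := mid_bounds hlr
      simp only
      by_cases h1 : PySem.Int.floordiv x (PySem.Int.floordiv (l + r) 2) > t
      · rw [if_pos h1]
        have hmM := (key_gt ht (by omega)).mp h1
        exact ih (PySem.Int.floordiv (l + r) 2 + 1) r f (by omega) (by omega) (by omega)
          (by omega)
      · rw [if_neg h1]
        have hMm : PySem.Int.floordiv x (t + 1) + 1 ≤ PySem.Int.floordiv (l + r) 2 :=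
          (key_le ht (by omega)).mp (by omega)
        by_cases h2 : PySem.Int.floordiv x (PySem.Int.floordiv (l + r) 2) < t
        · rw [if_pos h2]
          have hne : PySem.Int.floordiv (l + r) 2 ≠ PySem.Int.floordiv x (t + 1) + 1 := by
            intro he; rw [he, hhit] at h2; omega
          exact ih l (PySem.Int.floordiv (l + r) 2 - 1) f (by omega) (by omega) (by omega)
            (by omega)
        · rw [if_neg h2]
          exact ih l (PySem.Int.floordiv (l + r) 2) true (by omega) (by omega) (by omega)
            (by omega)
    · rw [fdLoop, dif_neg hlr]
      simp only
      omega

-- LOOP, miss case: x // M ≠ t ⇒ found stays false, and right ends ≥ M − 1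
lemma loop_miss {x t : Int} (hx : 1 ≤ x) (ht : 1 ≤ t)
    (hmiss : PySem.Int.floordiv x (PySem.Int.floordiv x (t + 1) + 1) ≠ t) :
    ∀ (n : Nat) (l r : Int) (f : Bool), (r - l).toNat ≤ n → 1 ≤ l →
      PySem.Int.floordiv x (t + 1) ≤ r →
      ∃ r', fdLoop x t l r f = (f, r') ∧ PySem.Int.floordiv x (t + 1) ≤ r' := by
  have hMle : PySem.Int.floordiv x (PySem.Int.floordiv x (t + 1) + 1) ≤ t :=
    (key_le ht (key_M_bounds hx ht).1).mpr (by omega)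
  intro n
  induction n with
  | zero =>
    intro l r f hn hl hMr
    rw [fdLoop, dif_neg (by omega : ¬ l < r)]
    exact ⟨r, rfl, by omega⟩
  | succ n ih =>
    intro l r f hn hl hMr
    by_cases hlr : l < r
    · rw [fdLoop, dif_pos hlr]
      have hmb := mid_bounds hlr
      simp only
      by_cases h1 : PySem.Int.floordiv x (PySem.Int.floordiv (l + r) 2) > t
      · rw [if_pos h1]
        exact ih (PySem.Int.floordiv (l + r) 2 + 1) r f (by omega) (by omega) (by omega)
      · rw [if_neg h1]
        have hMm : PySem.Int.floordiv x (t + 1) + 1 ≤ PySem.Int.floordiv (l + r) 2 :=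
          (key_le ht (by omega)).mp (by omega)
        have hanti := key_anti hx ht hMm
        have h2 : PySem.Int.floordiv x (PySem.Int.floordiv (l + r) 2) < t := by omega
        rw [if_pos h2]
        exact ih l (PySem.Int.floordiv (l + r) 2 - 1) f (by omega) (by omega) (by omega)
    · rw [fdLoop, dif_neg hlr]
      exact ⟨r, rfl, by omega⟩

-- find_divisor on a negative element
lemma find_neg {x t : Int} (hx : x < 0) :
    find_divisor x t = (if t = 1 then (true, x) else (false, x)) := by
  simp only [find_divisor]
  rw [fdLoop, dif_neg (by omega : ¬ (1 : Int) < x)]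
  simp only [fd_self (show x ≠ 0 by omega)]
  by_cases ht : t = 1
  · simp [ht]
  · rw [if_neg (by omega), if_neg ht]

-- the loop when target ≤ 0: every probe has x // mid ≥ 1 > target, right never moves
lemma loop_gt {x t : Int} (_hx : 1 ≤ x) (ht : t ≤ 0) :
    ∀ (n : Nat) (l r : Int) (f : Bool), (r - l).toNat ≤ n → 1 ≤ l → r ≤ x →
      fdLoop x t l r f = (f, r) := by
  intro n
  induction n with
  | zero =>
    intro l r f hn hl hrx
    rw [fdLoop, dif_neg (by omega : ¬ l < r)]
  | succ n ih =>
    intro l r f hn hl hrx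
    by_cases hlr : l < r
    · rw [fdLoop, dif_pos hlr]
      have hmb := mid_bounds hlr
      simp only
      have h1 : 1 ≤ PySem.Int.floordiv x (PySem.Int.floordiv (l + r) 2) :=
        (PySem.Int.le_floordiv_iff_mul_le (by omega)).mpr (by omega)
      rw [if_pos (by omega : PySem.Int.floordiv x (PySem.Int.floordiv (l + r) 2) > t)]
      exact ih (PySem.Int.floordiv (l + r) 2 + 1) r f (by omega) (by omega) (by omega)
    · rw [fdLoop, dif_neg hlr]

lemma find_pos_tle0 {x t : Int} (hx : 1 ≤ x) (ht : t ≤ 0) :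
    find_divisor x t = (false, x) := by
  simp only [find_divisor]
  rw [loop_gt hx ht (x - 1).toNat 1 x false (by omega) (by omega) (by omega)]
  simp only [fd_self (show x ≠ 0 by omega)]
  rw [if_neg (by omega)]

-- find_divisor on a positive element, positive target, hit case
lemma find_pos_hit {x t : Int} (hx : 1 ≤ x) (ht : 1 ≤ t)
    (hhit : PySem.Int.floordiv x (PySem.Int.floordiv x (t + 1) + 1) = t) :
    find_divisor x t = (true, PySem.Int.floordiv x (t + 1) + 1) := by
  simp only [find_divisor]
  have hMb := key_M_bounds hx ht
  have h2 := loop_hit hx ht hhit (x - 1).toNat 1 x false (by omega) (by omega)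
    (by omega) (by omega)
  rw [h2, hhit, if_pos rfl]

-- find_divisor on a positive element, positive target, miss case: found = false
lemma find_pos_miss {x t : Int} (hx : 1 ≤ x) (ht : 1 ≤ t)
    (hmiss : PySem.Int.floordiv x (PySem.Int.floordiv x (t + 1) + 1) ≠ t) :
    (find_divisor x t).1 = false := by
  simp only [find_divisor]
  have hMb := key_M_bounds hx ht
  obtain ⟨r', hr', hMr'⟩ := loop_miss hx ht hmiss (x - 1).toNat 1 x false (by omega)
    (by omega) (by omega)
  rw [hr']
  have hne : PySem.Int.floordiv x r' ≠ t := by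
    by_cases hcase : PySem.Int.floordiv x (t + 1) + 1 ≤ r'
    · have h1 := key_anti hx ht hcase
      have h2 : PySem.Int.floordiv x (PySem.Int.floordiv x (t + 1) + 1) ≤ t :=
        (key_le ht (by omega)).mpr (by omega)
      omega
    · have hr'M : r' = PySem.Int.floordiv x (t + 1) := by omega
      by_cases hM1 : PySem.Int.floordiv x (t + 1) = 0
      · rw [hr'M, hM1, fd_zero_right]; omega
      · have : t < PySem.Int.floordiv x r' := by
          rw [hr'M]
          exact (key_gt ht (by omega)).mpr (by omega)
        omega
  rw [if_neg hne]

-- for target = 1 every positive x hits: x // (x // 2 + 1) = 1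
lemma hit_one {x : Int} (hx : 1 ≤ x) :
    PySem.Int.floordiv x (PySem.Int.floordiv x (1 + 1) + 1) = 1 := by
  set q := PySem.Int.floordiv x 2 with hq
  have h1 : q ≤ q ↔ q * 2 ≤ x := hq ▸ PySem.Int.le_floordiv_iff_mul_le (by omega)
  have h2 : q < q + 1 ↔ x < (q + 1) * 2 := by
    constructor
    · intro _; exact (PySem.Int.floordiv_lt_iff_lt_mul (by omega)).mp (by omega)
    · intro _; omega
  have hlo := h1.mp le_rfl
  have hhi := h2.mp (by omega)
  have hq0 : 0 ≤ q := by nlinarith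
  show PySem.Int.floordiv x (q + 1) = 1
  exact (PySem.Int.floordiv_eq_iff_of_pos (by omega)).mpr (by constructor <;> nlinarith)

-- B fails as soon as a nonpositive element is reached
lemma goB_false_of_nonpos (t : Int) : ∀ (arr : List Int) (total : Int),
    (∃ x ∈ arr, x ≤ 0) → (goB arr t total).1 = false := by
  intro arr
  induction arr with
  | nil => rintro total ⟨x, hx, _⟩; simp at hx
  | cons y rest ih =>
    rintro total ⟨x, hx, hx0⟩
    rw [goB]
    by_cases hg : y ≤ 0 ∨ t ≤ 0
    · rw [if_pos hg]
    · rw [if_neg hg]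
      simp only
      by_cases hm : PySem.Int.floordiv y (PySem.Int.floordiv y (t + 1) + 1) ≠ t
      · rw [if_pos hm]
      · rw [if_neg hm]
        rcases List.mem_cons.mp hx with h | h
        · exact absurd (Or.inl (h ▸ hx0)) hg
        · exact ih _ ⟨x, h, hx0⟩

-- unpack one step of pvSafe
lemma pvSafe_cons {t x : Int} {rest : List Int} (h : pvSafe t (x :: rest) = true) :
    pvBadElem x t = false ∧ (pvPass x t = true → pvSafe t rest = true) := by
  simp only [pvSafe, Bool.and_eq_true, Bool.or_eq_true, Bool.not_eq_true'] at h
  exact ⟨h.1, fun hp => h.2.resolve_left (by simp [hp])⟩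

-- a non-bad element is nonzero
lemma ne_zero_of_not_bad {x t : Int} (h : pvBadElem x t = false) : x ≠ 0 := by
  simp only [pvBadElem, decide_eq_false_iff_not] at h
  exact fun h0 => h (Or.inl h0)

-- with target = 1 a safe array is zero-free
lemma safe_one : ∀ (arr : List Int), pvSafe 1 arr = true → ∀ x ∈ arr, x ≠ 0 := by
  intro arr
  induction arr with
  | nil => intro _ x hx; simp at hx
  | cons y rest ih =>
    intro h x hx
    obtain ⟨hbad, hnext⟩ := pvSafe_cons h
    rcases List.mem_cons.mp hx with rfl | hx'
    · exact ne_zero_of_not_bad hbad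
    · have hy0 : y ≠ 0 := ne_zero_of_not_bad hbad
      have hpass : pvPass y 1 = true := by
        simp only [pvPass, decide_eq_true_eq]
        rcases lt_trichotomy y 0 with hy | hy | hy
        · exact Or.inl ⟨hy, by norm_num⟩
        · exact absurd hy hy0
        · exact Or.inr ⟨hy, by norm_num, hit_one (by omega)⟩
      exact ih (hnext hpass) x hx'

-- A accepts everything with target = 1 on zero-free arrays
lemma goA_true_one : ∀ (arr : List Int) (total : Int),
    (∀ x ∈ arr, x ≠ 0) → (goA arr 1 total).1 = true := by
  intro arr
  induction arr with
  | nil => intro total _; rfl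
  | cons x rest ih =>
    intro total hsafe
    have hx0 : x ≠ 0 := hsafe x (by simp)
    rw [goA]
    rcases lt_trichotomy x 0 with hx | hx | hx
    · rw [find_neg hx]
      simp only
      exact ih _ (fun y hy => hsafe y (by simp [hy]))
    · omega
    · rw [find_pos_hit (by omega) le_rfl (hit_one (by omega))]
      simp only
      exact ih _ (fun y hy => hsafe y (by simp [hy]))

-- main induction: goA = goB on safe lists, provided target = 1 implies no negatives
lemma go_eq (t : Int) : ∀ (arr : List Int) (total : Int),
    pvSafe t arr = true → (t = 1 → ∀ x ∈ arr, 0 ≤ x) →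
    goA arr t total = goB arr t total := by
  intro arr
  induction arr with
  | nil => intro total _ _; rfl
  | cons x rest ih =>
    intro total hsafe hpos
    obtain ⟨hbad, hnext⟩ := pvSafe_cons hsafe
    have hx0 : x ≠ 0 := ne_zero_of_not_bad hbad
    rw [goA, goB]
    rcases lt_trichotomy x 0 with hx | hx | hx
    · have ht1 : t ≠ 1 := fun h1 => absurd (hpos h1 x (by simp)) (by omega)
      rw [find_neg hx, if_neg ht1, if_pos (Or.inl (by omega : x ≤ 0))]
      simp
    · omega
    · by_cases ht : t ≤ 0
      · rw [find_pos_tle0 (by omega) ht, if_pos (Or.inr ht)]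
        simp
      · have ht1 : 1 ≤ t := by omega
        rw [if_neg (by omega : ¬ (x ≤ 0 ∨ t ≤ 0))]
        simp only
        by_cases hhit : PySem.Int.floordiv x (PySem.Int.floordiv x (t + 1) + 1) = t
        · rw [find_pos_hit (by omega) ht1 hhit, if_neg (not_not_intro hhit)]
          have hpass : pvPass x t = true := by
            simp only [pvPass, decide_eq_true_eq]
            exact Or.inr ⟨hx, ht1, hhit⟩
          have hrest := hnext hpass
          simpa using ih _ hrest (fun h1 y hy => hpos h1 y (by simp [hy]))
        · have hf := find_pos_miss (by omega) ht1 hhit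
          rw [if_pos hhit]
          simp [hf]

-- ===== VERDICT (by name: the statement is the Claim_ definition above) =====
theorem check_all_divisors_spec : Claim_unchanged_check_all_divisors := by
  intro arr target _ hpre
  unfold Spec_check_all_divisors
  intro hnd
  unfold check_all_divisors check_all_divisors_alt
  refine go_eq target arr 0 hpre (fun h1 x hx => ?_)
  by_contra hneg
  exact hnd ⟨h1, x, hx, by omega⟩

theorem check_all_divisors_changed : Claim_changed_check_all_divisors := by
  unfold Claim_changed_check_all_divisors
  refine ⟨by decide, by decide, by decide, ?_, by decide, by decide⟩
  show check_all_divisors [-2] 1 = (true, -2)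
  unfold check_all_divisors
  rw [goA, find_neg (by norm_num : (-2 : Int) < 0)]
  norm_num [goA]

theorem check_all_divisors_tight : Claim_exact_check_all_divisors := by
  intro arr target _ hpre hd
  obtain ⟨ht1, x, hx, hxneg⟩ := hd
  subst ht1
  have hA : (check_all_divisors arr 1).1 = true :=
    goA_true_one arr 0 (safe_one arr hpre)
  have hB : (check_all_divisors_alt arr 1).1 = false :=
    goB_false_of_nonpos 1 arr 0 ⟨x, hx, by omega⟩
  intro heq
  rw [heq, hB] at hA
  exact absurd hA (by simp)
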